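-- pv_equiv track=rewrite | github.com/AsafBSh/Buildings_Footprint_Extractor | MainCode.py | sort_feature_entries
-- ===== SOURCE A (Python) =====
-- def sort_feature_entries(feature_entries, sort_option):
--     """
--     Sort the feature entries based on the specified option.
--
--     :param feature_entries: List of feature entry strings
--     :param sort_option: String, either "Alphabet" or "Value"
--     :return: Sorted list of feature entry strings
--     """
--
--     def extract_info(entry):
--         parts = entry.split()
--         ct_number = int(
--             parts[0].split("=")[1]
--         )  # Extract the number after 'FeatureEntry='
--         value = int(parts[5])
--         name_part = " ".join(parts[8:])  # Join all parts after the 8th element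
--         _, name = name_part.split(")", 1)
--         name = name.strip()
--         return ct_number, value, name
--
--     if sort_option == "Alphabet":
--         sorted_entries = sorted(
--             feature_entries, key=lambda x: extract_info(x)[2].lower()
--         )
--     elif sort_option == "Value":
--         sorted_entries = sorted(
--             feature_entries,
--             key=lambda x: (-extract_info(x)[1], extract_info(x)[2].lower()),
--         )
--     else:
--         return feature_entries  # No sorting if option is invalid
--
--     # Renumber the sorted entries
--     for i, entry in enumerate(sorted_entries):
--         parts = entry.split()
--         name_part = " ".join(parts[8:])
--         presence_idx, name = name_part.split(")", 1)
--         presence, idx = name_part.split(" ", 1)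
--         new_name = f"{i}) {name.strip()}"
--         parts[8:] = [presence, new_name]
--         sorted_entries[i] = " ".join(parts)
--
--     return sorted_entries
-- ===== SOURCE B (Python) =====
-- def sort_feature_entries(feature_entries, sort_option):
--     """Bottom-free rewrite: parse each entry once into a record carrying an
--     explicit (primary, lowered name, position) sort key, order the records with
--     a hand-written stable merge sort (ties impossible: the original position is
--     part of the key), then format the renumbered lines from the records."""
--     if sort_option not in ("Alphabet", "Value"):
--         return feature_entries
--
--     records = []
--     for i, entry in enumerate(feature_entries):
--         parts = entry.split()
--         int(parts[0].split("=")[1])  # validate the 'FeatureEntry=<int>' head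
--         value = int(parts[5])
--         tail = " ".join(parts[8:])
--         _, name = tail.split(")", 1)
--         name = name.strip()
--         presence, _rest = tail.split(" ", 1)
--         primary = -value if sort_option == "Value" else 0
--         records.append(((primary, name.lower(), i), parts[:8], presence, name))
--
--     ordered = _merge_sort(records)
--     return [
--         " ".join(head + [presence, f"{j}) {name}"])
--         for j, (_key, head, presence, name) in enumerate(ordered)
--     ]
--
--
-- def _merge_sort(items):
--     if len(items) <= 1:
--         return items
--     mid = len(items) // 2
--     return _merge(_merge_sort(items[:mid]), _merge_sort(items[mid:]))
--
--
-- def _merge(left, right):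
--     out = []
--     i = j = 0
--     while i < len(left) and j < len(right):
--         if left[i][0] < right[j][0]:
--             out.append(left[i])
--             i += 1
--         else:
--             out.append(right[j])
--             j += 1
--     return out + left[i:] + right[j:]
-- ===== Notes on version B (the rewrite author's own statement) =====
-- stated objective: alternative
-- what changed: A sorts the raw entry strings with the library stable sort, re-parsing each entry inside the key lambda, then re-splits every sorted line in a renumbering loop; B parses each entry once into a record whose explicit key carries (primary, lowered name, original position) and orders the records with a hand-written merge sort (stability recovered by the position tiebreak, so no stable sort is needed), formatting the renumbered lines directly from the records.
import Mathlib
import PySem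

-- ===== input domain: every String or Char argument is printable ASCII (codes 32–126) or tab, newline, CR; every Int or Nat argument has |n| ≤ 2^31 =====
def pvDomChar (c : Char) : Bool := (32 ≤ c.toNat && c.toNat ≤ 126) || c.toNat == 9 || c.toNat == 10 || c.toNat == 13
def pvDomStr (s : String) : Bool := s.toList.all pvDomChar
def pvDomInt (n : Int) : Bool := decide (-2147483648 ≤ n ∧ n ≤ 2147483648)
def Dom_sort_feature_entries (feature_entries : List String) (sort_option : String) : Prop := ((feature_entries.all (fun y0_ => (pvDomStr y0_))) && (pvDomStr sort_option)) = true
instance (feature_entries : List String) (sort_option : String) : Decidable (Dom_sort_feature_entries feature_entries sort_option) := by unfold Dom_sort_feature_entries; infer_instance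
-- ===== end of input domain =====

-- B replaces A's library stable sort over the raw entry strings (re-parsing each entry
-- inside the key lambda, then re-splitting every line to renumber) by a hand-written
-- merge sort over once-parsed records whose explicit key carries the original position
-- as a tiebreak (objective: alternative algorithm, same asymptotic cost).

-- ===== PORT A =====

-- extract_info(entry); raising spots (IndexError/ValueError) totalised with defaults,
-- excluded by Pre_ below
def pvExtractInfo (entry : String) : Int × Int × String :=
  let parts := PySem.Str.split₀ entry
  let ct_number := (PySem.Int.ofStr? (PySem.List.pyGetD
      ((PySem.Str.split? (PySem.List.pyGetD parts 0 "") "=").getD []) 1 "")).getD 0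
  let value := (PySem.Int.ofStr? (PySem.List.pyGetD parts 5 "")).getD 0
  let name_part := PySem.Str.join " " (PySem.List.slice parts (some 8) none)
  let name := PySem.Str.strip (PySem.List.pyGetD
      ((PySem.Str.splitMax? name_part ")" 1).getD []) 1 "")
  (ct_number, value, name)

-- one step of A's renumbering for-loop (the loop only rewrites index i from the
-- pre-mutation entry at i, so it is a map over enumerate(sorted_entries))
def pvRenumber (p : Int × String) : String :=
  let parts := PySem.Str.split₀ p.2
  let name_part := PySem.Str.join " " (PySem.List.slice parts (some 8) none)
  let name := PySem.List.pyGetD ((PySem.Str.splitMax? name_part ")" 1).getD []) 1 ""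
  let presence := PySem.List.pyGetD ((PySem.Str.splitMax? name_part " " 1).getD []) 0 ""
  let new_name := PySem.Int.toStr p.1 ++ ") " ++ PySem.Str.strip name
  PySem.Str.join " " (PySem.List.slice parts none (some 8) ++ [presence, new_name])

def sort_feature_entries (feature_entries : List String) (sort_option : String) : List String :=
  if sort_option = "Alphabet" then
    let sorted_entries := PySem.List.sorted feature_entries
      (fun x => PySem.Str.lower (pvExtractInfo x).2.2)
    (PySem.List.enumerate sorted_entries).map pvRenumber
  else if sort_option = "Value" then
    let sorted_entries := PySem.List.sorted2 feature_entries
      (fun x => -(pvExtractInfo x).2.1)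
      (fun x => PySem.Str.lower (pvExtractInfo x).2.2)
    (PySem.List.enumerate sorted_entries).map pvRenumber
  else
    feature_entries

-- ===== PORT B =====

-- a parsed record: (sort key (primary, lowered name, original position), head parts, presence, name)
abbrev PvRec : Type := (Int × String × Int) × List String × String × String

-- Python tuple '<' on the 3-component key, positionally (lexicographic)
def pvKeyLt (a b : Int × String × Int) : Bool :=
  decide (a.1 < b.1) ||
    (a.1 == b.1 && (decide (a.2.1 < b.2.1) || (a.2.1 == b.2.1 && decide (a.2.2 < b.2.2))))

-- one iteration of B's decoration loop (the 'int(parts[0].split("=")[1])' head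
-- validation only raises, never contributes a value; its raising inputs are excluded by Pre_)
def pvRecordB (sort_option : String) (p : Int × String) : PvRec :=
  let parts := PySem.Str.split₀ p.2
  let value := (PySem.Int.ofStr? (PySem.List.pyGetD parts 5 "")).getD 0
  let tail := PySem.Str.join " " (PySem.List.slice parts (some 8) none)
  let name := PySem.Str.strip (PySem.List.pyGetD
      ((PySem.Str.splitMax? tail ")" 1).getD []) 1 "")
  let presence := PySem.List.pyGetD ((PySem.Str.splitMax? tail " " 1).getD []) 0 ""
  let primary := if sort_option = "Value" then -value else 0
  ((primary, PySem.Str.lower name, p.1), PySem.List.slice parts none (some 8), presence, name)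

-- _merge: the index-based while loop, as the equivalent structural recursion on the two lists
def pvMerge : List PvRec → List PvRec → List PvRec
  | [], r => r
  | x :: xs, [] => x :: xs
  | x :: xs, y :: ys =>
      if pvKeyLt x.1 y.1 then x :: pvMerge xs (y :: ys) else y :: pvMerge (x :: xs) ys

-- _merge_sort: split at len//2 (= items.length / 2, nonnegative), recurse, merge
def pvMsort (items : List PvRec) : List PvRec :=
  if h : items.length ≤ 1 then items
  else
    let mid := items.length / 2
    pvMerge (pvMsort (items.take mid)) (pvMsort (items.drop mid))
termination_by items.length
decreasing_by
  · simp only [List.length_take]; omega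
  · simp only [List.length_drop]; omega

-- one element of B's output comprehension
def pvFormatB (p : Int × PvRec) : String :=
  PySem.Str.join " " (p.2.2.1 ++ [p.2.2.2.1, PySem.Int.toStr p.1 ++ ") " ++ p.2.2.2.2])

def sort_feature_entries_alt (feature_entries : List String) (sort_option : String) : List String :=
  if sort_option = "Alphabet" ∨ sort_option = "Value" then
    let records := (PySem.List.enumerate feature_entries).map (pvRecordB sort_option)
    let ordered := pvMsort records
    (PySem.List.enumerate ordered).map pvFormatB
  else
    feature_entries

-- ===== PRECONDITION & SPEC =====
-- Pre_ excludes exactly the inputs on which Python A raises (IndexError/ValueError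
-- while parsing an entry in the sort key or unpacking in the renumbering loop);
-- for an invalid sort_option A returns the list unchanged, so no condition is needed.
def Pre_sort_feature_entries (feature_entries : List String) (sort_option : String) : Prop :=
  (sort_option = "Alphabet" ∨ sort_option = "Value") →
    ∀ entry ∈ feature_entries,
      10 ≤ (PySem.Str.split₀ entry).length ∧
      2 ≤ ((PySem.Str.split? (PySem.List.pyGetD (PySem.Str.split₀ entry) 0 "") "=").getD []).length ∧
      (PySem.Int.ofStr? (PySem.List.pyGetD
        ((PySem.Str.split? (PySem.List.pyGetD (PySem.Str.split₀ entry) 0 "") "=").getD []) 1 "")).isSome = true ∧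
      (PySem.Int.ofStr? (PySem.List.pyGetD (PySem.Str.split₀ entry) 5 "")).isSome = true ∧
      PySem.Str.isIn ")" (PySem.Str.join " " (PySem.List.slice (PySem.Str.split₀ entry) (some 8) none)) = true
instance (feature_entries : List String) (sort_option : String) : Decidable (Pre_sort_feature_entries feature_entries sort_option) := by unfold Pre_sort_feature_entries; infer_instance

def pvWitness_sort_feature_entries : List String × String :=
  (["FeatureEntry=1 a b c d 4 e f (p) Beta", "FeatureEntry=0 a b c d 7 e f (q) alpha"], "Value")

def Spec_sort_feature_entries (feature_entries : List String) (sort_option : String) (out : List String) : Prop := out = sort_feature_entries_alt feature_entries sort_option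
instance (feature_entries : List String) (sort_option : String) (out : List String) : Decidable (Spec_sort_feature_entries feature_entries sort_option out) := by unfold Spec_sort_feature_entries; infer_instance

-- ===== CLAIM (what is proved, stated in full; the proofs are below) =====
def Claim_equal_sort_feature_entries : Prop := ∀ (feature_entries : List String) (sort_option : String), Dom_sort_feature_entries feature_entries sort_option → Pre_sort_feature_entries feature_entries sort_option → Spec_sort_feature_entries feature_entries sort_option (sort_feature_entries feature_entries sort_option)

-- ===== LEMMAS AND PROOFS =====

-- the record key, read as a lexicographic (linear-order) value
def pvKeyT (k : Int × String × Int) : Lex (Int × Lex (String × Int)) :=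
  toLex (k.1, toLex (k.2.1, k.2.2))

def pvKeyR (r : PvRec) : Lex (Int × Lex (String × Int)) := pvKeyT r.1

-- the Bool tuple comparison is the lexicographic order
theorem pvKeyLt_eq_decide (a b : Int × String × Int) :
    pvKeyLt a b = decide (pvKeyT a < pvKeyT b) := by
  rw [Bool.eq_iff_iff]
  simp [pvKeyLt, pvKeyT, Prod.Lex.toLex_lt_toLex]

-- ---- merge sort: permutation and sortedness ----

theorem pvMerge_perm (l r : List PvRec) : (pvMerge l r).Perm (l ++ r) := by
  fun_induction pvMerge with
  | case1 r => exact List.Perm.refl r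
  | case2 x xs => simp
  | case3 x xs y ys h ih => exact ih.cons x
  | case4 x xs y ys h ih => exact (ih.cons y).trans (List.perm_middle).symm

theorem pvMerge_pairwise (l r : List PvRec)
    (hl : l.Pairwise (fun a b => pvKeyR a < pvKeyR b))
    (hr : r.Pairwise (fun a b => pvKeyR a < pvKeyR b))
    (hne : ∀ a ∈ l, ∀ b ∈ r, pvKeyR a ≠ pvKeyR b) :
    (pvMerge l r).Pairwise (fun a b => pvKeyR a < pvKeyR b) := by
  fun_induction pvMerge with
  | case1 r => exact hr
  | case2 x xs => exact hl
  | case3 x xs y ys h ih =>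
      have hx : pvKeyR x < pvKeyR y := by
        have := (pvKeyLt_eq_decide x.1 y.1) ▸ h
        simpa [pvKeyR] using of_decide_eq_true this
      rw [List.pairwise_cons] at hl
      refine List.pairwise_cons.2 ⟨?_, ih hl.2 hr (fun a ha b hb => hne a (by simp [ha]) b hb)⟩
      intro z hz
      have hz' : z ∈ xs ++ (y :: ys) := (pvMerge_perm xs (y :: ys)).mem_iff.1 hz
      rcases List.mem_append.1 hz' with hz1 | hz2
      · exact hl.1 z hz1
      · rcases List.mem_cons.1 hz2 with rfl | hz3
        · exact hx
        · exact hx.trans ((List.pairwise_cons.1 hr).1 z hz3)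
  | case4 x xs y ys h ih =>
      have hxy : pvKeyR y < pvKeyR x := by
        have hb : pvKeyLt x.1 y.1 = false := by simpa using h
        have hnot : ¬ pvKeyR x < pvKeyR y := by
          rw [pvKeyLt_eq_decide] at hb
          simpa [pvKeyR] using of_decide_eq_false hb
        have hne' : pvKeyR x ≠ pvKeyR y := hne x (by simp) y (by simp)
        exact lt_of_le_of_ne (le_of_not_gt hnot) (Ne.symm hne')
      rw [List.pairwise_cons] at hr
      refine List.pairwise_cons.2 ⟨?_, ih hl hr.2 (fun a ha b hb => hne a ha b (by simp [hb]))⟩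
      intro z hz
      have hz' : z ∈ (x :: xs) ++ ys := (pvMerge_perm (x :: xs) ys).mem_iff.1 hz
      rcases List.mem_append.1 hz' with hz1 | hz2
      · rcases List.mem_cons.1 hz1 with rfl | hz3
        · exact hxy
        · exact hxy.trans ((List.pairwise_cons.1 hl).1 z hz3)
      · exact hr.1 z hz2

theorem pvMsort_perm (items : List PvRec) : (pvMsort items).Perm items := by
  fun_induction pvMsort with
  | case1 items h => exact List.Perm.refl items
  | case2 items h mid ih1 ih2 =>
      exact (pvMerge_perm _ _).trans <| (ih1.append ih2).trans (by rw [List.take_append_drop])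

theorem pvMsort_pairwise (items : List PvRec)
    (hd : items.Pairwise (fun a b => pvKeyR a ≠ pvKeyR b)) :
    (pvMsort items).Pairwise (fun a b => pvKeyR a < pvKeyR b) := by
  fun_induction pvMsort with
  | case1 items h =>
      match items, h with
      | [], _ => exact List.Pairwise.nil
      | [x], _ => exact List.pairwise_singleton _ x
  | case2 items h mid ih1 ih2 =>
      have hsplit := (List.take_append_drop mid items) ▸ hd
      rw [List.pairwise_append] at hsplit
      refine pvMerge_pairwise _ _ (ih1 hsplit.1) (ih2 hsplit.2.1) ?_
      intro a ha b hb
      exact hsplit.2.2 a ((pvMsort_perm _).mem_iff.1 ha) b ((pvMsort_perm _).mem_iff.1 hb)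

theorem pvMsort_eq_sorted (items : List PvRec)
    (hd : items.Pairwise (fun a b => pvKeyR a ≠ pvKeyR b)) :
    pvMsort items = PySem.List.sorted items pvKeyR :=
  (PySem.List.sorted_eq_of_perm_of_pairwise_lt items (pvMsort items) pvKeyR
    (pvMsort_perm items) (pvMsort_pairwise items hd)).symm

-- ---- sorting through a map (decorate/undecorate) ----

theorem pv_insertBy_map {α β : Type} (bf : α → α → Bool) (f : β → α) (x : β) (ys : List β) :
    PySem.List.insertBy bf (f x) (ys.map f)
      = (PySem.List.insertBy (fun a b => bf (f a) (f b)) x ys).map f := by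
  induction ys with
  | nil => rfl
  | cons y ys ih =>
    simp only [List.map_cons, PySem.List.insertBy]
    by_cases h : bf (f x) (f y) = true <;> simp [h, ih]

theorem pv_foldl_insertBy_map {α β : Type} (bf : α → α → Bool) (f : β → α)
    (xs : List β) (acc : List β) :
    List.foldl (fun acc x => PySem.List.insertBy bf x acc) (acc.map f) (xs.map f)
      = (List.foldl (fun acc x => PySem.List.insertBy (fun a b => bf (f a) (f b)) x acc) acc xs).map f := by
  induction xs generalizing acc with
  | nil => rfl
  | cons x xs ih =>
    simp only [List.map_cons, List.foldl_cons]
    rw [pv_insertBy_map, ih]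

theorem pv_sorted_map {α β κ : Type} [LT κ] [DecidableLT κ] (f : β → α)
    (xs : List β) (key : α → κ) :
    PySem.List.sorted (xs.map f) key
      = (PySem.List.sorted xs (fun x => key (f x))).map f := by
  simpa using pv_foldl_insertBy_map (fun a b => decide (key a < key b)) f xs []

theorem pv_sorted2_map {α β κ₁ κ₂ : Type} [LT κ₁] [DecidableLT κ₁] [LT κ₂] [DecidableLT κ₂]
    (f : β → α) (xs : List β) (k1 : α → κ₁) (k2 : α → κ₂) :
    PySem.List.sorted2 (xs.map f) k1 k2
      = (PySem.List.sorted2 xs (fun x => k1 (f x)) (fun x => k2 (f x))).map f := by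
  simpa using pv_foldl_insertBy_map
    (fun a b => decide (k1 a < k1 b) || !decide (k1 b < k1 a) && decide (k2 a < k2 b)) f xs []

theorem pv_enumerate_map {α β : Type} (f : α → β) (xs : List α) (s : Int) :
    PySem.List.enumerate (xs.map f) s
      = (PySem.List.enumerate xs s).map (fun p => (p.1, f p.2)) := by
  induction xs generalizing s with
  | nil => rfl
  | cons x xs ih => simp [PySem.List.enumerate_cons, ih]

-- ---- comparator congruence over a fold of insertions ----

theorem pv_insertBy_congr {α : Type} (bf₁ bf₂ : α → α → Bool) (x : α) (ys : List α)
    (h : ∀ y ∈ ys, bf₁ x y = bf₂ x y) :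
    PySem.List.insertBy bf₁ x ys = PySem.List.insertBy bf₂ x ys := by
  induction ys with
  | nil => rfl
  | cons y ys ih =>
    simp only [PySem.List.insertBy, h y (by simp)]
    by_cases hb : bf₂ x y = true <;>
      simp [hb, ih (fun z hz => h z (by simp [hz]))]

theorem pv_foldl_insertBy_congr {α : Type} (bf₁ bf₂ : α → α → Bool) :
    ∀ (l acc : List α),
    (∀ x ∈ l, ∀ y ∈ acc, bf₁ x y = bf₂ x y) →
    l.Pairwise (fun y x => bf₁ x y = bf₂ x y) →
    List.foldl (fun acc x => PySem.List.insertBy bf₁ x acc) acc l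
      = List.foldl (fun acc x => PySem.List.insertBy bf₂ x acc) acc l := by
  intro l
  induction l with
  | nil => intro acc _ _; rfl
  | cons x l ih =>
    intro acc h1 h2
    rw [List.pairwise_cons] at h2
    have hacc : PySem.List.insertBy bf₁ x acc = PySem.List.insertBy bf₂ x acc :=
      pv_insertBy_congr bf₁ bf₂ x acc (h1 x (by simp))
    simp only [List.foldl_cons, hacc]
    refine ih _ ?_ h2.2
    intro x' hx' y hy
    rcases (PySem.List.mem_insertBy bf₂ x y acc).1 hy with rfl | hy'
    · exact h2.1 x' hx'
    · exact h1 x' (by simp [hx']) y hy'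

-- ---- the two sort passes compute the same ordered decoration ----

def pvKeyRec (sort_option : String) (p : Int × String) : Lex (Int × Lex (String × Int)) :=
  pvKeyR (pvRecordB sort_option p)

theorem pvKeyRec_alpha (p : Int × String) :
    pvKeyRec "Alphabet" p
      = toLex ((0 : Int), toLex (PySem.Str.lower (pvExtractInfo p.2).2.2, p.1)) := by
  simp only [pvKeyRec, pvKeyR, pvKeyT, pvRecordB, pvExtractInfo, String.reduceEq, if_false]

theorem pvKeyRec_value (p : Int × String) :
    pvKeyRec "Value" p
      = toLex (-(pvExtractInfo p.2).2.1, toLex (PySem.Str.lower (pvExtractInfo p.2).2.2, p.1)) := by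
  simp only [pvKeyRec, pvKeyR, pvKeyT, pvRecordB, pvExtractInfo, if_true]

theorem pv_alpha_bf (x y : Int × String) (h : y.1 < x.1) :
    decide (PySem.Str.lower (pvExtractInfo x.2).2.2 < PySem.Str.lower (pvExtractInfo y.2).2.2)
      = decide (pvKeyRec "Alphabet" x < pvKeyRec "Alphabet" y) := by
  rw [Bool.eq_iff_iff, pvKeyRec_alpha, pvKeyRec_alpha]
  simp only [Prod.Lex.toLex_lt_toLex, decide_eq_true_eq, lt_irrefl, false_or, true_and]
  constructor
  · exact Or.inl
  · rintro (h' | ⟨he, hlt⟩)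
    · exact h'
    · exact absurd (hlt.trans h) (lt_irrefl _)

theorem pv_value_bf (x y : Int × String) (h : y.1 < x.1) :
    (decide (-(pvExtractInfo x.2).2.1 < -(pvExtractInfo y.2).2.1) ||
      (!decide (-(pvExtractInfo y.2).2.1 < -(pvExtractInfo x.2).2.1) &&
        decide (PySem.Str.lower (pvExtractInfo x.2).2.2 < PySem.Str.lower (pvExtractInfo y.2).2.2)))
      = decide (pvKeyRec "Value" x < pvKeyRec "Value" y) := by
  rw [Bool.eq_iff_iff, pvKeyRec_value, pvKeyRec_value]
  simp only [Prod.Lex.toLex_lt_toLex, Bool.or_eq_true, Bool.and_eq_true, Bool.not_eq_true',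
    decide_eq_true_eq, decide_eq_false_iff_not]
  constructor
  · rintro (h' | ⟨hle, hlt⟩)
    · exact Or.inl h'
    · rcases lt_trichotomy (-(pvExtractInfo x.2).2.1) (-(pvExtractInfo y.2).2.1) with hv | hv | hv
      · exact Or.inl hv
      · exact Or.inr ⟨hv, Or.inl hlt⟩
      · exact absurd hv hle
  · rintro (h' | ⟨he, hlt | ⟨he2, hp⟩⟩)
    · exact Or.inl h'
    · exact Or.inr ⟨by omega, hlt⟩
    · exact absurd (hp.trans h) (lt_irrefl _)

theorem pv_sorted_alpha (fe : List String) :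
    PySem.List.sorted (PySem.List.enumerate fe)
        (fun p => PySem.Str.lower (pvExtractInfo p.2).2.2)
      = PySem.List.sorted (PySem.List.enumerate fe) (fun p => pvKeyRec "Alphabet" p) := by
  rw [PySem.List.sorted_eq_foldl_insertBy, PySem.List.sorted_eq_foldl_insertBy]
  refine pv_foldl_insertBy_congr _ _ _ [] (fun _ _ y hy => by simp at hy) ?_
  exact (PySem.List.pairwise_lt_enumerate fe 0).imp (fun h => pv_alpha_bf _ _ h)

theorem pv_sorted_value (fe : List String) :
    PySem.List.sorted2 (PySem.List.enumerate fe)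
        (fun p => -(pvExtractInfo p.2).2.1)
        (fun p => PySem.Str.lower (pvExtractInfo p.2).2.2)
      = PySem.List.sorted (PySem.List.enumerate fe) (fun p => pvKeyRec "Value" p) := by
  rw [PySem.List.sorted_eq_foldl_insertBy,
    show PySem.List.sorted2 (PySem.List.enumerate fe)
        (fun p => -(pvExtractInfo p.2).2.1)
        (fun p => PySem.Str.lower (pvExtractInfo p.2).2.2)
      = List.foldl (fun acc x => PySem.List.insertBy
          (fun a b => decide (-(pvExtractInfo a.2).2.1 < -(pvExtractInfo b.2).2.1) ||
            (!decide (-(pvExtractInfo b.2).2.1 < -(pvExtractInfo a.2).2.1) &&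
              decide (PySem.Str.lower (pvExtractInfo a.2).2.2 < PySem.Str.lower (pvExtractInfo b.2).2.2))) x acc)
          [] (PySem.List.enumerate fe) from rfl]
  refine pv_foldl_insertBy_congr _ _ _ [] (fun _ _ y hy => by simp at hy) ?_
  exact (PySem.List.pairwise_lt_enumerate fe 0).imp (fun h => pv_value_bf _ _ h)

-- the decorated list has pairwise-distinct keys (the original position is a key component)
theorem pv_records_distinct (fe : List String) (so : String) :
    ((PySem.List.enumerate fe).map (pvRecordB so)).Pairwise
      (fun a b => pvKeyR a ≠ pvKeyR b) := by
  rw [List.pairwise_map]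
  refine (PySem.List.pairwise_lt_enumerate fe 0).imp ?_
  intro p q h hk
  simp only [pvKeyR, pvKeyT, pvRecordB, toLex_inj, Prod.mk.injEq] at hk
  omega

-- renumbering a sorted entry = formatting its record (the key component is ignored)
theorem pv_format_record (so : String) (i : Int) (p : Int × String) :
    pvFormatB (i, pvRecordB so p) = pvRenumber (i, p.2) := by
  simp only [pvFormatB, pvRecordB, pvRenumber]

-- ===== VERDICT (by name: the statement is the Claim_ definition above) =====
theorem sort_feature_entries_spec : Claim_equal_sort_feature_entries := by
  intro fe so _ _
  unfold Spec_sort_feature_entries sort_feature_entries sort_feature_entries_alt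
  by_cases h1 : so = "Alphabet"
  · subst h1
    simp only [reduceIte, String.reduceEq, true_or]
    rw [pvMsort_eq_sorted _ (pv_records_distinct fe "Alphabet"),
      pv_sorted_map (pvRecordB "Alphabet") (PySem.List.enumerate fe) pvKeyR,
      pv_enumerate_map, List.map_map]
    conv_lhs => rw [← PySem.List.map_snd_enumerate fe 0]
    rw [pv_sorted_map, pv_enumerate_map, List.map_map, pv_sorted_alpha]
    exact List.map_congr_left (fun p _ => (pv_format_record "Alphabet" p.1 p.2).symm)
  · by_cases h2 : so = "Value"
    · subst h2
      simp only [String.reduceEq, or_true, reduceIte]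
      rw [pvMsort_eq_sorted _ (pv_records_distinct fe "Value"),
        pv_sorted_map (pvRecordB "Value") (PySem.List.enumerate fe) pvKeyR,
        pv_enumerate_map, List.map_map]
      conv_lhs => rw [← PySem.List.map_snd_enumerate fe 0]
      rw [pv_sorted2_map, pv_enumerate_map, List.map_map, pv_sorted_value]
      exact List.map_congr_left (fun p _ => (pv_format_record "Value" p.1 p.2).symm)
    · simp [h1, h2]
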